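-- pv_equiv track=rewrite | github.com/andrewharp/ComfyUI-EasyNodes | easy_nodes/llm_debugging.py | split_top_level_entries
-- ===== SOURCE A (Python) =====
-- def split_top_level_entries(code):
--     """
--     Splits the code into top-level entries (classes, functions, and statements).
--     Parameters:
--     - code: The code containing top-level entries.
--     Returns:
--     - A list of top-level entry code strings.
--     """
--     entries = []
--     current_entry = []
--     start_indices = []
--
--     for i, line in enumerate(code.split('\n')):
--         indent_level = len(line) - len(line.lstrip())
--         line_empty = len(line.strip()) == 0
--
--         # It's a new entry if the line has an indent level of 0 and is not empty or a comment,
--         # and the previous line is not a decorator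
--         if (
--             indent_level == 0
--             and not line_empty
--             and not line.strip().startswith('#')
--             and (not current_entry or not current_entry[-1].strip().startswith('@'))
--         ):
--             if current_entry:
--                 entries.append('\n'.join(current_entry))
--             current_entry = []
--             start_indices.append(i)
--
--         current_entry.append(line)
--
--     if current_entry:
--         entries.append('\n'.join(current_entry))
--
--     return entries, start_indices
-- ===== SOURCE B (Python) =====
-- def split_top_level_entries(code):
--     """
--     Splits the code into top-level entries (classes, functions, and statements).
--     Parameters:
--     - code: The code containing top-level entries.
--     Returns:
--     - A list of top-level entry code strings.
--     """
--     lines = code.split('\n')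
--     boundaries = [
--         i for i, (line, prev) in enumerate(zip(lines, [''] + lines))
--         if len(line) - len(line.lstrip()) == 0
--         and line.strip() != ''
--         and not line.strip().startswith('#')
--         and not prev.strip().startswith('@')
--     ]
--     cuts = boundaries if boundaries[:1] == [0] else [0] + boundaries
--     pairs = list(zip(cuts, cuts[1:] + [len(lines)]))
--     return ['\n'.join(lines[a:b]) for a, b in pairs], boundaries
-- ===== Notes on version B (the rewrite author's own statement) =====
-- stated objective: alternative
-- what changed: A builds entries with one stateful loop carrying a current-entry accumulator; B makes two passes: it first computes the list of boundary line indices (zipping each line with its predecessor for the decorator check), then slices the split lines between consecutive boundaries and joins each group.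
import Mathlib
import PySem

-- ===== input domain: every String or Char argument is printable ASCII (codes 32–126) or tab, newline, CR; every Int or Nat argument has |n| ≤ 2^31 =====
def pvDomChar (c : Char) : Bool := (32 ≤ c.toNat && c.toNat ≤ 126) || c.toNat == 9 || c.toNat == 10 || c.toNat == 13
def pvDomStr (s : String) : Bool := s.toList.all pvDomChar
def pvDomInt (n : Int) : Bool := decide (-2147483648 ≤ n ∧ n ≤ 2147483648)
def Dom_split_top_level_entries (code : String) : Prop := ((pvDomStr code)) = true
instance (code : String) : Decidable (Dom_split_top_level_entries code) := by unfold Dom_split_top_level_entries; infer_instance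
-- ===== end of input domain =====

-- B replaces A's single stateful accumulator loop by two passes: first collect the list of
-- top-level boundary line indices, then slice the line list between consecutive boundaries.
-- Objective: alternative decomposition (same cost), no behaviour change.

-- ===== PORT A =====
-- one loop iteration of A: state = (entries, current_entry, start_indices)
def stepA (st : List String × List String × List Int) (p : Int × String) :
    List String × List String × List Int :=
  if PySem.Str.len p.2 - PySem.Str.len (PySem.Str.lstrip p.2) == 0 &&
      !(PySem.Str.len (PySem.Str.strip p.2) == 0) &&
      !(PySem.Str.startswith (PySem.Str.strip p.2) "#") &&
      (st.2.1.isEmpty || !(PySem.Str.startswith (PySem.Str.strip (st.2.1.getLastD "")) "@")) then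
    ((if st.2.1.isEmpty then st.1 else st.1 ++ [PySem.Str.join "\n" st.2.1]),
     [p.2], st.2.2 ++ [p.1])
  else
    (st.1, st.2.1 ++ [p.2], st.2.2)

def split_top_level_entries (code : String) : List String × List Int :=
  -- code.split('\n'): the separator is the non-empty literal "\n", so split? is always some
  let lines := (PySem.Str.split? code "\n").getD []
  let st := (PySem.List.enumerate lines 0).foldl stepA ([], [], [])
  ((if st.2.1.isEmpty then st.1 else st.1 ++ [PySem.Str.join "\n" st.2.1]), st.2.2)

-- ===== PORT B =====
-- the comprehension's condition: `line` is a top-level boundary given the previous raw line `prev`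
def altCond (line prev : String) : Bool :=
  PySem.Str.len line - PySem.Str.len (PySem.Str.lstrip line) == 0 &&
  !(PySem.Str.strip line == "") &&
  !(PySem.Str.startswith (PySem.Str.strip line) "#") &&
  !(PySem.Str.startswith (PySem.Str.strip prev) "@")

def split_top_level_entries_alt (code : String) : List String × List Int :=
  let lines := (PySem.Str.split? code "\n").getD []
  let boundaries := ((PySem.List.enumerate (lines.zip ("" :: lines)) 0).filter
      (fun p => altCond p.2.1 p.2.2)).map (·.1)
  let cuts := if boundaries.take 1 == [(0 : Int)] then boundaries else 0 :: boundaries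
  let pairs := cuts.zip (cuts.tail ++ [(lines.length : Int)])
  -- lines[a:b] for 0 ≤ a, 0 ≤ b (all cuts are line indices ≥ 0): drop/take is exact here
  (pairs.map (fun ab => PySem.Str.join "\n" ((lines.drop ab.1.toNat).take (ab.2 - ab.1).toNat)),
   boundaries)

-- ===== PRECONDITION & SPEC =====
def Spec_split_top_level_entries (code : String) (out : List String × List Int) : Prop := out = split_top_level_entries_alt code
instance (code : String) (out : List String × List Int) : Decidable (Spec_split_top_level_entries code out) := by unfold Spec_split_top_level_entries; infer_instance

-- ===== CLAIM (what is proved, stated in full; the proofs are below) =====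
def Claim_equal_split_top_level_entries : Prop := ∀ (code : String), Dom_split_top_level_entries code → Spec_split_top_level_entries code (split_top_level_entries code)

-- ===== LEMMAS AND PROOFS =====

-- relative boundary indices of the remaining lines, given the previous raw line
def rbnds (prev : String) : List String → List Nat
  | [] => []
  | l :: ls => if altCond l prev then 0 :: (rbnds l ls).map (fun k : Nat => k + 1) else (rbnds l ls).map (fun k : Nat => k + 1)

-- the groups of lines A's loop produces, with C the group accumulated so far
def gr (C : List String) : List String → List (List String)
  | [] => if C.isEmpty then [] else [C]
  | l :: ls =>
      if altCond l (C.getLastD "") then (if C.isEmpty then [] else [C]) ++ gr [l] ls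
      else gr (C ++ [l]) ls

theorem strEqEmpty (s : String) : (s == "") = s.toList.isEmpty := by
  rw [Bool.eq_iff_iff, beq_iff_eq, List.isEmpty_iff, ← String.toList_inj]
  simp

theorem len_strip_eq_zero (s : String) :
    (PySem.Str.len (PySem.Str.strip s) == 0) = (PySem.Str.strip s == "") := by
  rw [strEqEmpty]
  simp only [PySem.Str.len_eq]
  rw [Bool.eq_iff_iff, beq_iff_eq]
  simp [List.isEmpty_iff, List.length_eq_zero_iff]

theorem condA_eq (l : String) (C : List String) :
    (PySem.Str.len l - PySem.Str.len (PySem.Str.lstrip l) == 0 &&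
      !(PySem.Str.len (PySem.Str.strip l) == 0) &&
      !(PySem.Str.startswith (PySem.Str.strip l) "#") &&
      (C.isEmpty || !(PySem.Str.startswith (PySem.Str.strip (C.getLastD "")) "@")))
    = altCond l (C.getLastD "") := by
  rw [len_strip_eq_zero]
  cases C with
  | nil =>
      have h : PySem.Chars.startswith (PySem.Chars.strip []) ['@'] = false := by decide
      simp [altCond, h]
  | cons x xs => simp [altCond]

theorem map_shift (r : List Nat) (s : Int) :
    (r.map (· + 1)).map (fun k : Nat => s + (k : Int)) = r.map (fun k : Nat => (s + 1) + (k : Int)) := by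
  rw [List.map_map]
  apply List.map_congr_left
  intro a _
  simp only [Function.comp]
  push_cast
  ring

theorem loopA (rest : List String) : ∀ (s : Int) (E C : List String) (S : List Int),
    (fun st : List String × List String × List Int =>
      ((if st.2.1.isEmpty then st.1 else st.1 ++ [PySem.Str.join "\n" st.2.1]), st.2.2))
      ((PySem.List.enumerate rest s).foldl stepA (E, C, S))
    = (E ++ (gr C rest).map (PySem.Str.join "\n"),
       S ++ (rbnds (C.getLastD "") rest).map (fun k : Nat => s + (k : Int))) := by
  induction rest with
  | nil =>
      intro s E C S
      cases C <;> simp [gr, rbnds]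
  | cons l ls ih =>
      intro s E C S
      rw [PySem.List.enumerate_cons, List.foldl_cons]
      have hstep : stepA (E, C, S) (s, l) =
          if altCond l (C.getLastD "") then
            ((if C.isEmpty then E else E ++ [PySem.Str.join "\n" C]), [l], S ++ [s])
          else (E, C ++ [l], S) := by
        simp only [stepA]
        rw [condA_eq]
      rw [hstep]
      by_cases h : altCond l (C.getLastD "") = true
      · rw [if_pos h, ih (s + 1)]
        show _ = (E ++ (gr C (l :: ls)).map _, S ++ (rbnds (C.getLastD "") (l :: ls)).map _)
        rw [show gr C (l :: ls) = (if C.isEmpty then [] else [C]) ++ gr [l] ls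
              from by rw [gr]; rw [if_pos h],
            show rbnds (C.getLastD "") (l :: ls) = 0 :: (rbnds l ls).map (fun k : Nat => k + 1)
              from by rw [rbnds]; rw [if_pos h]]
        rw [List.map_cons, List.map_append, map_shift]
        rw [Prod.mk.injEq]
        refine ⟨?_, ?_⟩
        · cases hC : C.isEmpty <;> simp [List.append_assoc]
        · simp [List.append_assoc]
      · rw [if_neg h, ih (s + 1)]
        show _ = (E ++ (gr C (l :: ls)).map _, S ++ (rbnds (C.getLastD "") (l :: ls)).map _)
        rw [show gr C (l :: ls) = gr (C ++ [l]) ls from by rw [gr]; rw [if_neg h],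
            show rbnds (C.getLastD "") (l :: ls) = (rbnds l ls).map (fun k : Nat => k + 1)
              from by rw [rbnds]; rw [if_neg h]]
        rw [map_shift, List.getLastD_concat]

theorem boundariesB (ls : List String) : ∀ (prev : String) (s : Int),
    ((PySem.List.enumerate (ls.zip (prev :: ls)) s).filter
        (fun p => altCond p.2.1 p.2.2)).map (·.1)
    = (rbnds prev ls).map (fun k : Nat => s + (k : Int)) := by
  induction ls with
  | nil => intro prev s; simp [rbnds]
  | cons l ls ih =>
      intro prev s
      rw [List.zip_cons_cons, PySem.List.enumerate_cons]
      cases h : altCond l prev with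
      | true =>
          rw [show rbnds prev (l :: ls) = 0 :: (rbnds l ls).map (fun k : Nat => k + 1)
                from by rw [rbnds, if_pos h]]
          simp only [List.filter_cons, h, if_true, List.map_cons, ih l (s + 1), map_shift]
          simp
      | false =>
          rw [show rbnds prev (l :: ls) = (rbnds l ls).map (fun k : Nat => k + 1)
                from by rw [rbnds, if_neg (by simp [h])]]
          simp only [List.filter_cons, h, Bool.false_eq_true, if_false, ih l (s + 1), map_shift]

-- Nat-level slicing of the full line list between consecutive cuts
def sliceJoin (full : List String) (ab : Nat × Nat) : String :=
  PySem.Str.join "\n" ((full.drop ab.1).take (ab.2 - ab.1))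

theorem sliceShift (C rest : List String) (u v : List Nat) :
    ((u.map (fun k : Nat => k + C.length)).zip (v.map (fun k : Nat => k + C.length))).map (sliceJoin (C ++ rest))
    = (u.zip v).map (sliceJoin rest) := by
  rw [List.zip_map, List.map_map]
  apply List.map_congr_left
  intro ab _
  simp only [Function.comp, Prod.map, sliceJoin]
  rw [Nat.add_comm ab.1 C.length, List.drop_length_add_append,
    show ab.2 + C.length - (C.length + ab.1) = ab.2 - ab.1 from by omega]

theorem groupsB (xs : List String) : ∀ (C : List String), C ≠ [] →
    ((0 :: (rbnds (C.getLastD "") xs).map (fun k : Nat => k + C.length)).zip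
        ((rbnds (C.getLastD "") xs).map (fun k : Nat => k + C.length) ++ [C.length + xs.length])).map
      (sliceJoin (C ++ xs))
    = (gr C xs).map (PySem.Str.join "\n") := by
  induction xs with
  | nil =>
      intro C hC
      rw [show rbnds (C.getLastD "") [] = [] from rfl]
      simp [sliceJoin, gr, List.isEmpty_iff, hC]
  | cons l ls ih =>
      intro C hC
      by_cases h : altCond l (C.getLastD "") = true
      · rw [show rbnds (C.getLastD "") (l :: ls) = 0 :: (rbnds l ls).map (fun k : Nat => k + 1)
              from by rw [rbnds]; rw [if_pos h],
            show gr C (l :: ls) = (if C.isEmpty then [] else [C]) ++ gr [l] ls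
              from by rw [gr]; rw [if_pos h]]
        rw [show (if C.isEmpty then ([] : List (List String)) else [C]) = [C]
              from by simp [List.isEmpty_iff, hC]]
        rw [List.map_cons, Nat.zero_add, List.cons_append, List.zip_cons_cons, List.map_cons]
        have htail :
            ((C.length :: ((rbnds l ls).map (fun k : Nat => k + 1)).map (fun k : Nat => k + C.length)).zip
              (((rbnds l ls).map (fun k : Nat => k + 1)).map (fun k : Nat => k + C.length) ++ [C.length + (l :: ls).length])).map
                (sliceJoin (C ++ l :: ls))
            = (gr [l] ls).map (PySem.Str.join "\n") := by
          have h1 : (C.length :: ((rbnds l ls).map (fun k : Nat => k + 1)).map (fun k : Nat => k + C.length))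
              = ((0 :: (rbnds l ls).map (fun k : Nat => k + 1)).map (fun k : Nat => k + C.length)) := by
            simp
          have h2 : (((rbnds l ls).map (fun k : Nat => k + 1)).map (fun k : Nat => k + C.length) ++ [C.length + (l :: ls).length])
              = (((rbnds l ls).map (fun k : Nat => k + 1) ++ [1 + ls.length]).map (fun k : Nat => k + C.length)) := by
            simp [List.length_cons]
            omega
          rw [h1, h2, sliceShift C (l :: ls)]
          have := ih [l] (by simp)
          simpa using this
        rw [htail]
        rw [show sliceJoin (C ++ l :: ls) (0, C.length) = PySem.Str.join "\n" C
              from by simp [sliceJoin]]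
        simp
      · rw [show rbnds (C.getLastD "") (l :: ls) = (rbnds l ls).map (fun k : Nat => k + 1)
              from by rw [rbnds]; rw [if_neg h],
            show gr C (l :: ls) = gr (C ++ [l]) ls
              from by rw [gr]; rw [if_neg h]]
        have := ih (C ++ [l]) (by simp)
        rw [List.getLastD_concat] at this
        rw [← this]
        have h1 : ((rbnds l ls).map (fun k : Nat => k + 1)).map (fun k : Nat => k + C.length)
            = (rbnds l ls).map (fun k : Nat => k + (C ++ [l]).length) := by
          rw [List.map_map]; apply List.map_congr_left; intro a _; simp; omega
        have h2 : C.length + (l :: ls).length = (C ++ [l]).length + ls.length := by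
          simp; omega
        rw [h1, h2, List.append_assoc]
        rfl

theorem go_ne_nil (fuel : Nat) : ∀ (sep l cur : List Char) (acc : List (List Char)),
    PySem.Chars.splitOn.go sep fuel l cur acc ≠ [] := by
  induction fuel with
  | zero => intro sep l cur acc; simp [PySem.Chars.splitOn.go]
  | succ n ih =>
      intro sep l cur acc
      cases l with
      | nil => simp [PySem.Chars.splitOn.go]
      | cons c rest =>
          rw [PySem.Chars.splitOn.go]
          split
          · exact ih _ _ _ _
          · exact ih _ _ _ _

theorem split_ne_nil (code : String) : (PySem.Str.split? code "\n").getD [] ≠ [] := by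
  simp only [PySem.Str.split?, PySem.Chars.split?]
  rw [if_neg (by decide)]
  simp only [Option.map_some, Option.getD_some, ne_eq, List.map_eq_nil_iff]
  exact go_ne_nil _ _ _ _ _

theorem take1_false (r : List Nat) :
    ((List.take 1 ((r.map (fun k : Nat => k + 1)).map (fun k : Nat => (k : Int)))) == [(0 : Int)]) = false := by
  cases r with
  | nil => simp
  | cons a t => simp; omega

theorem map_zero_add (r : List Nat) :
    r.map (fun k : Nat => (0 : Int) + (k : Int)) = r.map (fun k : Nat => (k : Int)) := by
  apply List.map_congr_left; intro a _; omega

theorem castPairs (u v : List Nat) (full : List String) :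
    ((u.map (fun k : Nat => (k : Int))).zip (v.map (fun k : Nat => (k : Int)))).map
      (fun ab : Int × Int => PySem.Str.join "\n" ((full.drop ab.1.toNat).take (ab.2 - ab.1).toNat))
    = (u.zip v).map (sliceJoin full) := by
  rw [List.zip_map, List.map_map]
  apply List.map_congr_left
  intro ab _
  simp only [Function.comp, Prod.map, sliceJoin, Int.toNat_natCast, Int.toNat_sub]

-- ===== VERDICT (by name: the statement is the Claim_ definition above) =====
theorem split_top_level_entries_spec : Claim_equal_split_top_level_entries := by
  intro code _
  show split_top_level_entries code = split_top_level_entries_alt code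
  simp only [split_top_level_entries, split_top_level_entries_alt]
  have hA := loopA ((PySem.Str.split? code "\n").getD []) 0 [] [] []
  simp only [List.getLastD_nil, List.nil_append, map_zero_add] at hA
  rw [hA, boundariesB, map_zero_add]
  have hne := split_ne_nil code
  generalize hl : (PySem.Str.split? code "\n").getD [] = lines at hA hne ⊢
  clear hA hl
  cases lines with
  | nil => exact absurd rfl hne
  | cons x xs =>
      clear hne
      have hg := groupsB xs [x] (by simp)
      rw [show ([x].getLastD "") = x from rfl] at hg
      simp only [List.length_cons, List.length_nil, List.singleton_append, Nat.zero_add] at hg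
      by_cases hx : altCond x "" = true
      · rw [show rbnds "" (x :: xs) = 0 :: (rbnds x xs).map (fun k : Nat => k + 1)
              from by rw [rbnds, if_pos hx],
            show gr [] (x :: xs) = gr [x] xs
              from by rw [gr]; simp [hx]]
        rw [if_pos (by simp)]
        rw [show ((0 : Nat) :: (rbnds x xs).map (fun k : Nat => k + 1)).map (fun k : Nat => (k : Int))
              = (0 : Int) :: ((rbnds x xs).map (fun k : Nat => k + 1)).map (fun k : Nat => (k : Int))
              from by simp]
        rw [show ((0 : Int) :: ((rbnds x xs).map (fun k : Nat => k + 1)).map (fun k : Nat => (k : Int))).tail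
                ++ [((x :: xs).length : Int)]
              = (((rbnds x xs).map (fun k : Nat => k + 1)) ++ [(x :: xs).length]).map (fun k : Nat => (k : Int))
              from by simp]
        rw [show ((0 : Int) :: ((rbnds x xs).map (fun k : Nat => k + 1)).map (fun k : Nat => (k : Int)))
              = ((0 : Nat) :: ((rbnds x xs).map (fun k : Nat => k + 1))).map (fun k : Nat => (k : Int))
              from by simp]
        rw [castPairs]
        rw [show (x :: xs).length = 1 + xs.length from by simp [Nat.add_comm]]
        rw [hg]
      · rw [show rbnds "" (x :: xs) = (rbnds x xs).map (fun k : Nat => k + 1)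
              from by rw [rbnds, if_neg (by simp [hx])],
            show gr [] (x :: xs) = gr [x] xs
              from by rw [gr]; simp [hx]]
        rw [if_neg (by rw [take1_false]; simp)]
        rw [show ((0 : Int) :: ((rbnds x xs).map (fun k : Nat => k + 1)).map (fun k : Nat => (k : Int)))
              = ((0 : Nat) :: ((rbnds x xs).map (fun k : Nat => k + 1))).map (fun k : Nat => (k : Int))
              from by simp]
        rw [show (((0 : Nat) :: ((rbnds x xs).map (fun k : Nat => k + 1))).map (fun k : Nat => (k : Int))).tail
                ++ [((x :: xs).length : Int)]
              = (((rbnds x xs).map (fun k : Nat => k + 1)) ++ [(x :: xs).length]).map (fun k : Nat => (k : Int))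
              from by simp]
        rw [castPairs]
        rw [show (x :: xs).length = 1 + xs.length from by simp [Nat.add_comm]]
        rw [hg]
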